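-- pv_equiv track=rewrite | github.com/its-cutie-valerie/daily-challenges | march-2026/3-07-daylight-savings/daylight_savings.py | calculate_sleep_debt
-- ===== SOURCE A (Python) =====
-- def calculate_sleep_debt(planned, actual):
--   sleep_debt = 0
--
--   streak = 0
--   longest_streak = 0
--
--   for i in range(len(planned)):
--     gap = planned[i] - actual[i]
--
--     if gap > 0:
--       sleep_debt += gap
--       streak += 1
--
--       if longest_streak < streak:
--         longest_streak = streak
--     else:
--       streak = 0
--
--   sleep_debt += 1
--
--   return sleep_debt, longest_streak
-- ===== SOURCE B (Python) =====
-- def calculate_sleep_debt(planned, actual):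
--   gaps = [planned[i] - actual[i] for i in range(len(planned))]
--   sleep_debt = 1 + sum(g for g in gaps if g > 0)
--   lead = 0
--   best = 0
--   for g in reversed(gaps):
--     if g > 0:
--       lead += 1
--       if lead > best:
--         best = lead
--     else:
--       lead = 0
--   return sleep_debt, best
-- ===== Notes on version B (the rewrite author's own statement) =====
-- stated objective: alternative
-- what changed: B materialises the gap list once, gets the sleep debt as a closed-form 1 + sum of the positive gaps, and finds the longest positive run by a separate back-to-front pass (a right fold) instead of A's single left-to-right accumulator loop that interleaves debt, streak and longest.
import Mathlib
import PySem

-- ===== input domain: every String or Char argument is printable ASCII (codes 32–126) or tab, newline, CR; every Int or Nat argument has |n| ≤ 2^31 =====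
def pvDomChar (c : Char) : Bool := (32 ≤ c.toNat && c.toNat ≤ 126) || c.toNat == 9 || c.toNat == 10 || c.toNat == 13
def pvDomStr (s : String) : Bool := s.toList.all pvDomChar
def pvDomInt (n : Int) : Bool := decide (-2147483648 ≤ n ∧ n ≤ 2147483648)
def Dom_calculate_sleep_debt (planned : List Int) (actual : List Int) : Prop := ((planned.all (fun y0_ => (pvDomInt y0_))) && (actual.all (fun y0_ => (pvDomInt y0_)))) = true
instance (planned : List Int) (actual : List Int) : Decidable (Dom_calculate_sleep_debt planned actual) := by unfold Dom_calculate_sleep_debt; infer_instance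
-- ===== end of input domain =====

-- B recomputes the same pair by a different decomposition: gap list built once, sleep debt as 1 + sum of positive gaps, longest positive run by a back-to-front pass; A interleaves all three in one forward loop.


-- ===== PORT A =====
def calculate_sleep_debt (planned : List Int) (actual : List Int) : Int × Int :=
  let st := (List.range planned.length).foldl
    (fun (st : Int × Int × Int) (i : Nat) =>
      let gap := PySem.List.pyGetD planned (i : Int) 0 - PySem.List.pyGetD actual (i : Int) 0
      if gap > 0 then
        (st.1 + gap, st.2.1 + 1,
          if st.2.2 < st.2.1 + 1 then st.2.1 + 1 else st.2.2)
      else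
        (st.1, 0, st.2.2))
    (0, 0, 0)
  (st.1 + 1, st.2.2)

-- ===== PORT B =====
def calculate_sleep_debt_alt (planned : List Int) (actual : List Int) : Int × Int :=
  let gaps := (List.range planned.length).map
    (fun (i : Nat) => PySem.List.pyGetD planned (i : Int) 0 - PySem.List.pyGetD actual (i : Int) 0)
  let sleep_debt := 1 + (gaps.filter (fun g => decide (g > 0))).sum
  let lb := gaps.reverse.foldl
    (fun (lb : Int × Int) g =>
      if g > 0 then (lb.1 + 1, if lb.1 + 1 > lb.2 then lb.1 + 1 else lb.2)
      else (0, lb.2))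
    (0, 0)
  (sleep_debt, lb.2)

-- ===== PRECONDITION & SPEC =====
-- Pre_ excludes inputs where actual is shorter than planned: there A (and B) raise IndexError.
def Pre_calculate_sleep_debt (planned : List Int) (actual : List Int) : Prop :=
  planned.length ≤ actual.length
instance (planned : List Int) (actual : List Int) : Decidable (Pre_calculate_sleep_debt planned actual) := by unfold Pre_calculate_sleep_debt; infer_instance
def pvWitness_calculate_sleep_debt : List Int × List Int := ([8, 7, 6], [7, 8, 5])
def Spec_calculate_sleep_debt (planned : List Int) (actual : List Int) (out : Int × Int) : Prop := out = calculate_sleep_debt_alt planned actual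
instance (planned : List Int) (actual : List Int) (out : Int × Int) : Decidable (Spec_calculate_sleep_debt planned actual out) := by unfold Spec_calculate_sleep_debt; infer_instance

-- ===== CLAIM (what is proved, stated in full; the proofs are below) =====
def Claim_equal_calculate_sleep_debt : Prop := ∀ (planned : List Int) (actual : List Int), Dom_calculate_sleep_debt planned actual → Pre_calculate_sleep_debt planned actual → Spec_calculate_sleep_debt planned actual (calculate_sleep_debt planned actual)

-- ===== LEMMAS AND PROOFS =====

-- A's loop body, as a step function over the gap value
def stepA (st : Int × Int × Int) (g : Int) : Int × Int × Int :=
  if g > 0 then (st.1 + g, st.2.1 + 1, if st.2.2 < st.2.1 + 1 then st.2.1 + 1 else st.2.2)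
  else (st.1, 0, st.2.2)

-- B's loop body (as a right-fold step, after List.foldl_reverse)
def stepB (g : Int) (lb : Int × Int) : Int × Int :=
  if g > 0 then (lb.1 + 1, if lb.1 + 1 > lb.2 then lb.1 + 1 else lb.2)
  else (0, lb.2)

-- trailing positive-run length of gs given incoming streak s
def trRun (gs : List Int) (s : Int) : Int :=
  match gs with
  | [] => s
  | g :: t => if g > 0 then trRun t (s + 1) else trRun t 0

-- longest positive-run value reached, given incoming streak s
def bstRun (gs : List Int) (s : Int) : Int :=
  match gs with
  | [] => s
  | g :: t => if g > 0 then bstRun t (s + 1) else max s (bstRun t 0)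

theorem le_bstRun (gs : List Int) (s : Int) : s ≤ bstRun gs s := by
  induction gs generalizing s with
  | nil => simp [bstRun]
  | cons g t ih =>
    simp only [bstRun]
    split
    · exact le_trans (by omega) (ih (s + 1))
    · exact le_max_left _ _

theorem foldlA_char (gs : List Int) (d s L : Int) (hs : 0 ≤ s) (hL : s ≤ L) :
    gs.foldl stepA (d, s, L) =
      (d + (gs.filter (fun g => decide (g > 0))).sum, trRun gs s, max L (bstRun gs s)) := by
  induction gs generalizing d s L with
  | nil => simp [trRun, bstRun, max_eq_left hL]
  | cons g t ih =>
    rw [List.foldl_cons]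
    by_cases hg : g > 0
    · have hstep : stepA (d, s, L) g = (d + g, s + 1, max L (s + 1)) := by
        simp only [stepA, if_pos hg]
        congr 2
        omega
      rw [hstep, ih (d + g) (s + 1) (max L (s + 1)) (by omega) (le_max_right _ _)]
      have hb := le_bstRun t (s + 1)
      simp only [trRun, bstRun, List.filter_cons, hg, decide_true, if_pos, List.sum_cons,
        Prod.mk.injEq]
      refine ⟨by ring, by trivial, by omega⟩
    · have hstep : stepA (d, s, L) g = (d, 0, L) := by
        simp [stepA, hg]
      rw [hstep, ih d 0 L le_rfl (le_trans hs hL)]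
      simp only [trRun, bstRun, List.filter_cons, hg, decide_false, if_neg,
        Prod.mk.injEq, not_false_eq_true]
      refine ⟨by trivial, by trivial, by omega⟩

-- B's right fold: 0 ≤ lead and lead ≤ best
theorem foldrB_bounds (gs : List Int) :
    0 ≤ (gs.foldr stepB (0, 0)).1 ∧ (gs.foldr stepB (0, 0)).1 ≤ (gs.foldr stepB (0, 0)).2 := by
  induction gs with
  | nil => simp
  | cons g t ih =>
    simp only [List.foldr_cons, stepB]
    split
    · refine ⟨by omega, ?_⟩
      by_cases h : (t.foldr stepB (0, 0)).1 + 1 > (t.foldr stepB (0, 0)).2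
      · simp only [h, if_pos]
        omega
      · simp only [h, if_neg, not_false_eq_true]
        omega
    · exact ⟨le_rfl, le_trans ih.1 ih.2⟩

theorem bstRun_eq_foldrB (gs : List Int) (s : Int) (hs : 0 ≤ s) :
    bstRun gs s = max (s + (gs.foldr stepB (0, 0)).1) (gs.foldr stepB (0, 0)).2 := by
  induction gs generalizing s with
  | nil => simp [bstRun, max_eq_left hs]
  | cons g t ih =>
    have hb := foldrB_bounds t
    simp only [bstRun, List.foldr_cons, stepB]
    by_cases hg : g > 0
    · rw [if_pos hg, if_pos hg, ih (s + 1) (by omega)]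
      by_cases h : (t.foldr stepB (0, 0)).1 + 1 > (t.foldr stepB (0, 0)).2
      · simp only [h, if_pos]
        omega
      · simp only [h, if_neg, not_false_eq_true]
        omega
    · rw [if_neg hg, if_neg hg, ih 0 le_rfl]
      simp only [zero_add]
      omega

-- ===== VERDICT (by name: the statement is the Claim_ definition above) =====
theorem calculate_sleep_debt_spec : Claim_equal_calculate_sleep_debt := by
  intro planned actual _ _
  unfold Spec_calculate_sleep_debt calculate_sleep_debt calculate_sleep_debt_alt
  have hA : (List.range planned.length).foldl
      (fun (st : Int × Int × Int) (i : Nat) =>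
        let gap := PySem.List.pyGetD planned (i : Int) 0 - PySem.List.pyGetD actual (i : Int) 0
        if gap > 0 then
          (st.1 + gap, st.2.1 + 1, if st.2.2 < st.2.1 + 1 then st.2.1 + 1 else st.2.2)
        else (st.1, 0, st.2.2)) (0, 0, 0) =
      ((List.range planned.length).map
        (fun (i : Nat) => PySem.List.pyGetD planned (i : Int) 0 - PySem.List.pyGetD actual (i : Int) 0)).foldl
        stepA (0, 0, 0) := by
    rw [List.foldl_map]
    rfl
  set gaps := (List.range planned.length).map
    (fun (i : Nat) => PySem.List.pyGetD planned (i : Int) 0 - PySem.List.pyGetD actual (i : Int) 0) with hgaps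
  simp only [hA, foldlA_char gaps 0 0 0 le_rfl le_rfl, List.foldl_reverse]
  have hB : gaps.foldr
      (fun g (lb : Int × Int) =>
        if g > 0 then (lb.1 + 1, if lb.1 + 1 > lb.2 then lb.1 + 1 else lb.2)
        else (0, lb.2)) (0, 0) = gaps.foldr stepB (0, 0) := rfl
  rw [hB, bstRun_eq_foldrB gaps 0 le_rfl]
  have hb := foldrB_bounds gaps
  simp only [Prod.mk.injEq]
  exact ⟨by ring, by omega⟩
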